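-- pv_equiv track=rewrite | github.com/cvf-bcn-gituser/bass-critic | bassimmusic-experiments/bass_for_beginners/one_time_scripts/BCN_MTG_Days_Poster/technical_correlates.py | with_predominant_grade
-- ===== SOURCE A (Python) =====
-- def with_predominant_grade(grade, gs, rubric):
--     with_grade = False
--     for g in gs:
--         gr = int(g[rubric])
--         if abs(grade - gr) > 1:
--             return False
--         if gr == grade:
--             with_grade = True
--     return with_grade
-- ===== SOURCE B (Python) =====
-- def with_predominant_grade(grade, gs, rubric):
--     # Two lazy scans: every grade within distance 1, and some grade equal.
--     return all(abs(grade - int(g[rubric])) <= 1 for g in gs) and \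
--            any(int(g[rubric]) == grade for g in gs)
-- ===== Notes on version B (the rewrite author's own statement) =====
-- stated objective: simpler
-- what changed: Replaces the single accumulator loop with early return by the conjunction of two lazy scans (all within distance 1, and any equal), with no mutable flag.
import Mathlib
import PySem

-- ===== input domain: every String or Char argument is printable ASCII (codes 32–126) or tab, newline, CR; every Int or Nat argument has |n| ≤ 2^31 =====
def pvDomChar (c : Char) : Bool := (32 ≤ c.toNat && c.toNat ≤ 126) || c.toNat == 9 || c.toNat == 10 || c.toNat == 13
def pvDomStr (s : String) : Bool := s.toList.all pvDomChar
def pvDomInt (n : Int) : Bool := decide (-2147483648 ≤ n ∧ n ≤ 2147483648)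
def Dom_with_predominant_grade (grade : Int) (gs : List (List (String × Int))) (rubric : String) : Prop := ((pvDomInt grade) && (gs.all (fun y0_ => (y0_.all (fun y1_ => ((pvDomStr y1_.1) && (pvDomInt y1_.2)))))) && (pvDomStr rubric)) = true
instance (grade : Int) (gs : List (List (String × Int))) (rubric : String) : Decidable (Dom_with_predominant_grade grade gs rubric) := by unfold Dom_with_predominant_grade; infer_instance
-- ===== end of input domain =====

-- B replaces A's single accumulator loop with early return by the conjunction of two
-- separate scans (all grades within distance 1, and some grade equal): simpler, no flag.

-- ===== PORT A =====
-- dict lookup g[rubric]: first match in the association list; Pre_ guarantees the key is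
-- present wherever the Python loop actually reads it, so the default 0 is never observed.
def pvGetD (g : List (String × Int)) (r : String) : Int := (g.lookup r).getD 0

def withLoopA (grade : Int) (rubric : String) : List (List (String × Int)) → Bool → Bool
  | [], wg => wg
  | g :: rest, wg =>
    let gr := pvGetD g rubric
    if 1 < |grade - gr| then false
    else withLoopA grade rubric rest (wg || decide (gr = grade))

def with_predominant_grade (grade : Int) (gs : List (List (String × Int))) (rubric : String) : Bool :=
  withLoopA grade rubric gs false

-- ===== PORT B =====
def with_predominant_grade_alt (grade : Int) (gs : List (List (String × Int))) (rubric : String) : Bool :=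
  (gs.all fun g => decide (|grade - pvGetD g rubric| ≤ 1)) &&
  (gs.any fun g => decide (pvGetD g rubric = grade))

-- ===== PRECONDITION & SPEC =====
-- Pre_ excludes exactly the inputs where the Python A raises KeyError: some dict the loop
-- reaches (every earlier dict has the key with a within-distance-1 value) lacks rubric.
-- The Python B raises at exactly the same inputs, so nothing A returns on is excluded.
def Pre_with_predominant_grade (grade : Int) (gs : List (List (String × Int))) (rubric : String) : Prop :=
  ∀ i : Fin gs.length, (gs.get i).lookup rubric = none →
    ∃ j : Fin gs.length, j.val < i.val ∧
      ∃ v, (gs.get j).lookup rubric = some v ∧ 1 < |grade - v|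
instance (grade : Int) (gs : List (List (String × Int))) (rubric : String) : Decidable (Pre_with_predominant_grade grade gs rubric) := by unfold Pre_with_predominant_grade; infer_instance

def pvWitness_with_predominant_grade : Int × (List (List (String × Int))) × String :=
  (3, [[("r", 3)], [("r", 4)]], "r")

def Spec_with_predominant_grade (grade : Int) (gs : List (List (String × Int))) (rubric : String) (out : Bool) : Prop := out = with_predominant_grade_alt grade gs rubric
instance (grade : Int) (gs : List (List (String × Int))) (rubric : String) (out : Bool) : Decidable (Spec_with_predominant_grade grade gs rubric out) := by unfold Spec_with_predominant_grade; infer_instance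

-- ===== CLAIM (what is proved, stated in full; the proofs are below) =====
def Claim_equal_with_predominant_grade : Prop := ∀ (grade : Int) (gs : List (List (String × Int))) (rubric : String), Dom_with_predominant_grade grade gs rubric → Pre_with_predominant_grade grade gs rubric → Spec_with_predominant_grade grade gs rubric (with_predominant_grade grade gs rubric)

-- ===== LEMMAS AND PROOFS =====
-- Loop characterisation: A's loop equals "all within range" && (flag || "any equal").
theorem withLoopA_eq (grade : Int) (rubric : String) :
    ∀ (gs : List (List (String × Int))) (wg : Bool),
      withLoopA grade rubric gs wg =
        ((gs.all fun g => decide (|grade - pvGetD g rubric| ≤ 1)) &&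
         (wg || gs.any fun g => decide (pvGetD g rubric = grade))) := by
  intro gs
  induction gs with
  | nil => intro wg; simp [withLoopA]
  | cons g rest ih =>
    intro wg
    by_cases h : 1 < |grade - pvGetD g rubric|
    · simp [withLoopA, h, List.all_cons]
    · simp only [withLoopA, if_neg h, ih, List.all_cons, List.any_cons]
      have h' : |grade - pvGetD g rubric| ≤ 1 := by omega
      simp [h']
      cases wg <;> cases (decide (pvGetD g rubric = grade)) <;> simp

-- ===== VERDICT (by name: the statement is the Claim_ definition above) =====
theorem with_predominant_grade_spec : Claim_equal_with_predominant_grade := by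
  intro grade gs rubric _ _
  unfold Spec_with_predominant_grade with_predominant_grade with_predominant_grade_alt
  rw [withLoopA_eq]
  simp
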